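-- pv_equiv track=rewrite | github.com/ferhatelmas/algo | topCoder/srms/500s/srm539/div2/platypus_paternity.py | maxFamily
-- ===== SOURCE A (Python) =====
-- def maxFamily(femaleCompatibility, maleCompatibility, siblingGroups):
--     c = 0
--     for s in siblingGroups:
--         for f in femaleCompatibility:
--             for m in maleCompatibility:
--                 ok, curr = True, 0
--                 for i, e in enumerate(s):
--                     if e == "Y":
--                         curr += 1
--                         ok = ok and f[i] == m[i] == "Y"
--                 if ok:
--                     c = max(c, curr + 2)
--     return c
-- ===== SOURCE B (Python) =====
-- def maxFamily(femaleCompatibility, maleCompatibility, siblingGroups):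
--     def compatible(t, ys):
--         return all(i < len(t) and t[i] == "Y" for i in ys)
--     best = 0
--     for s in siblingGroups:
--         ys = [i for i, e in enumerate(s) if e == "Y"]
--         if any(compatible(f, ys) for f in femaleCompatibility) and \
--            any(compatible(m, ys) for m in maleCompatibility):
--             best = max(best, len(ys) + 2)
--     return best
-- ===== Notes on version B (the rewrite author's own statement) =====
-- stated objective: faster
-- what changed: A tests every (female, male) pair against each sibling group with a shared scan; B computes each group's 'Y' positions once and checks independently whether any compatible female and any compatible male exist, removing the quadratic pairing.
import Mathlib
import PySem

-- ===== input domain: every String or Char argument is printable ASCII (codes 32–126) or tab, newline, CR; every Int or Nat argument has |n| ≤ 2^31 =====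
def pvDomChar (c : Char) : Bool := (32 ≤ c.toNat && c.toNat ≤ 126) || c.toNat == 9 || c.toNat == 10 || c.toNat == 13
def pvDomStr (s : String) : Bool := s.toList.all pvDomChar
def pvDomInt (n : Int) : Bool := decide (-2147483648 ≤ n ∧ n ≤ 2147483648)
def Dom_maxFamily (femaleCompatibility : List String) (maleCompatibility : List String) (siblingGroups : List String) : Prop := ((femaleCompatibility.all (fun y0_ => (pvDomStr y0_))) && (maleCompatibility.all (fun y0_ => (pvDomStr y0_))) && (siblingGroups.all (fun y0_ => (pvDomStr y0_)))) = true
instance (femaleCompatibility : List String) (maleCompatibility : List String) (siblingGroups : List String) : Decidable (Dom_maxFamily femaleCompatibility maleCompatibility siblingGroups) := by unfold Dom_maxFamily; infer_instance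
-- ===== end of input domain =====

set_option maxRecDepth 8000


-- B replaces A's scan over every (female, male) pair by two independent existence checks per
-- sibling group (objective: faster, asymptotic — O(|S|·(|F|+|M|)·n) instead of O(|S|·|F|·|M|·n)).

-- ===== PORT A =====
-- one step of A's inner 'for i, e in enumerate(s)' loop; state = (ok, curr), none = IndexError
def pvStepA (f m : List Char) (acc : Option (Bool × Int)) (p : Int × Char) : Option (Bool × Int) :=
  match acc with
  | none => none
  | some (ok, curr) =>
    if p.2 == 'Y' then
      let curr' := curr + 1
      if ok then
        -- 'ok and f[i] == m[i] == "Y"': short-circuit; f[i] and m[i] both evaluated when reached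
        match PySem.List.pyGet? f p.1, PySem.List.pyGet? m p.1 with
        | some fc, some mc => some (fc == mc && mc == 'Y', curr')
        | _, _ => none
      else some (false, curr')
    else some (ok, curr)

def pvInnerA (f m s : List Char) : Option (Bool × Int) :=
  (PySem.List.enumerate s).foldl (pvStepA f m) (some (true, 0))

def maxFamily (femaleCompatibility : List String) (maleCompatibility : List String) (siblingGroups : List String) : Int :=
  (siblingGroups.foldl (fun acc s =>
    femaleCompatibility.foldl (fun acc f =>
      maleCompatibility.foldl (fun acc m =>
        match acc with
        | none => none
        | some c =>
          match pvInnerA f.toList m.toList s.toList with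
          | none => none
          | some (ok, curr) => some (if ok then max c (curr + 2) else c)) acc) acc)
    (some (0 : Int))).getD 0

-- ===== PORT B =====
-- ys = [i for i, e in enumerate(s) if e == "Y"]
def pvYPos (s : List Char) : List Int :=
  (PySem.List.enumerate s).filterMap (fun p => if p.2 == 'Y' then some p.1 else none)

-- compatible(t, ys) = all(i < len(t) and t[i] == "Y" for i in ys)
def pvCompat (t : List Char) (ys : List Int) : Bool :=
  ys.all (fun i => decide (i < (t.length : Int)) && (PySem.List.pyGetD t i ' ' == 'Y'))

def maxFamily_alt (femaleCompatibility : List String) (maleCompatibility : List String) (siblingGroups : List String) : Int :=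
  siblingGroups.foldl (fun best s =>
    let ys := pvYPos s.toList
    if femaleCompatibility.any (fun f => pvCompat f.toList ys) &&
       maleCompatibility.any (fun m => pvCompat m.toList ys)
    then max best ((ys.length : Int) + 2) else best) 0

-- ===== PRECONDITION & SPEC =====
-- position n is in range of both strings and carries 'Y' in both
abbrev pvGoodAt (f m : List Char) (n : Nat) : Prop :=
  n < f.length ∧ n < m.length ∧ f.getD n ' ' = 'Y' ∧ m.getD n ' ' = 'Y'

-- A's scan of s (whose suffix cs starts at absolute position k) performs no out-of-range access:
-- every 'Y' position reached while all earlier 'Y' positions were good lies inside both strings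
abbrev pvSafeFrom (f m cs : List Char) (k : Nat) : Prop :=
  ∀ i < cs.length,
    (∀ j < i, cs.getD j ' ' = 'Y' → pvGoodAt f m (k + j)) →
    cs.getD i ' ' = 'Y' →
    (k + i < f.length ∧ k + i < m.length)

-- Pre_ excludes exactly the inputs where A raises IndexError: some sibling group has a 'Y' at a
-- position past the end of a female/male string that A's scan reaches while still compatible.
def Pre_maxFamily (femaleCompatibility : List String) (maleCompatibility : List String) (siblingGroups : List String) : Prop :=
  ∀ s ∈ siblingGroups, ∀ f ∈ femaleCompatibility, ∀ m ∈ maleCompatibility,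
    pvSafeFrom f.toList m.toList s.toList 0
instance (femaleCompatibility : List String) (maleCompatibility : List String) (siblingGroups : List String) : Decidable (Pre_maxFamily femaleCompatibility maleCompatibility siblingGroups) := by unfold Pre_maxFamily; infer_instance

def pvWitness_maxFamily : List String × List String × List String := (["YY", "NY"], ["YN"], ["YN", "N"])

def Spec_maxFamily (femaleCompatibility : List String) (maleCompatibility : List String) (siblingGroups : List String) (out : Int) : Prop := out = maxFamily_alt femaleCompatibility maleCompatibility siblingGroups
instance (femaleCompatibility : List String) (maleCompatibility : List String) (siblingGroups : List String) (out : Int) : Decidable (Spec_maxFamily femaleCompatibility maleCompatibility siblingGroups out) := by unfold Spec_maxFamily; infer_instance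

-- ===== CLAIM (what is proved, stated in full; the proofs are below) =====
def Claim_equal_maxFamily : Prop := ∀ (femaleCompatibility : List String) (maleCompatibility : List String) (siblingGroups : List String), Dom_maxFamily femaleCompatibility maleCompatibility siblingGroups → Pre_maxFamily femaleCompatibility maleCompatibility siblingGroups → Spec_maxFamily femaleCompatibility maleCompatibility siblingGroups (maxFamily femaleCompatibility maleCompatibility siblingGroups)
-- ===== LEMMAS AND PROOFS =====

-- recursive restatement of A's inner loop (proof helper)
def pvRunA (f m : List Char) : List Char → Nat → Bool → Int → Option (Bool × Int)
  | [], _, ok, curr => some (ok, curr)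
  | c :: cs, k, ok, curr =>
    if c == 'Y' then
      if ok then
        match PySem.List.pyGet? f (k : Int), PySem.List.pyGet? m (k : Int) with
        | some fc, some mc => pvRunA f m cs (k + 1) (fc == mc && mc == 'Y') (curr + 1)
        | _, _ => none
      else pvRunA f m cs (k + 1) false (curr + 1)
    else pvRunA f m cs (k + 1) ok curr

-- all 'Y' positions of cs (starting at absolute k) are good for (f, m)
def pvAllGood (f m : List Char) : List Char → Nat → Bool
  | [], _ => true
  | c :: cs, k =>
    if c == 'Y' then decide (pvGoodAt f m k) && pvAllGood f m cs (k + 1)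
    else pvAllGood f m cs (k + 1)

def pvCountY (cs : List Char) : Int := ((cs.filter (· == 'Y')).length : Int)

-- Y positions of cs starting at absolute offset k (generalisation of pvYPos)
def pvYFrom (cs : List Char) (k : Nat) : List Int :=
  (PySem.List.enumerate cs (k : Int)).filterMap (fun p => if p.2 == 'Y' then some p.1 else none)

lemma pvYPos_eq_from (s : List Char) : pvYPos s = pvYFrom s 0 := by
  simp [pvYPos, pvYFrom]

lemma pvFoldNone (f m : List Char) (l : List (Int × Char)) :
    l.foldl (pvStepA f m) none = none := by
  induction l with
  | nil => rfl
  | cons p l ih => simpa [pvStepA] using ih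

lemma pvFold_eq_run (f m : List Char) (cs : List Char) :
    ∀ (k : Nat) (ok : Bool) (curr : Int),
      (PySem.List.enumerate cs (k : Int)).foldl (pvStepA f m) (some (ok, curr)) = pvRunA f m cs k ok curr := by
  induction cs with
  | nil => intro k ok curr; simp [PySem.List.enumerate_nil, pvRunA]
  | cons c cs ih =>
    intro k ok curr
    rw [PySem.List.enumerate_cons, List.foldl_cons]
    have hcast : ((k : Int) + 1) = ((k + 1 : Nat) : Int) := by push_cast; ring
    by_cases hc : c = 'Y'
    · subst hc
      by_cases hok : ok = true
      · subst hok
        cases hf : PySem.List.pyGet? f (k : Int) with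
        | none =>
          have h1 : pvStepA f m (some (true, curr)) ((k : Int), 'Y') = none := by
            simp [pvStepA, hf]
          rw [h1, pvFoldNone, pvRunA]; simp [hf]
        | some fc =>
          cases hm : PySem.List.pyGet? m (k : Int) with
          | none =>
            have h1 : pvStepA f m (some (true, curr)) ((k : Int), 'Y') = none := by
              simp [pvStepA, hf, hm]
            rw [h1, pvFoldNone, pvRunA]; simp [hf, hm]
          | some mc =>
            have h1 : pvStepA f m (some (true, curr)) ((k : Int), 'Y')
                = some (fc == mc && mc == 'Y', curr + 1) := by
              simp [pvStepA, hf, hm]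
            rw [h1, hcast, ih, pvRunA]; simp [hf, hm]
      · simp only [Bool.not_eq_true] at hok; subst hok
        have h1 : pvStepA f m (some (false, curr)) ((k : Int), 'Y') = some (false, curr + 1) := by
          simp [pvStepA]
        rw [h1, hcast, ih, pvRunA]; simp
    · have h1 : pvStepA f m (some (ok, curr)) ((k : Int), c) = some (ok, curr) := by
        simp [pvStepA, hc]
      rw [h1, hcast, ih, pvRunA]; simp [hc]

lemma pvRunA_false (f m : List Char) (cs : List Char) :
    ∀ (k : Nat) (curr : Int), pvRunA f m cs k false curr = some (false, curr + pvCountY cs) := by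
  induction cs with
  | nil => intro k curr; simp [pvRunA, pvCountY]
  | cons c cs ih =>
    intro k curr
    by_cases hc : c = 'Y'
    · subst hc; simp [pvRunA, ih, pvCountY]; ring
    · simp [pvRunA, hc, ih, pvCountY]

lemma pvSafe_cons (f m : List Char) (c : Char) (cs : List Char) (k : Nat)
    (h : pvSafeFrom f m (c :: cs) k) (hgood : c = 'Y' → pvGoodAt f m k) :
    pvSafeFrom f m cs (k + 1) := by
  intro i hi hpre hy
  have h' := h (i + 1) (by simpa using hi) ?_ (by simpa using hy)
  · omega
  · intro j hj hyj
    cases j with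
    | zero =>
      have : c = 'Y' := by simpa using hyj
      simpa using hgood this
    | succ j' =>
      have := hpre j' (by omega) (by simpa using hyj)
      have e : k + 1 + j' = k + (j' + 1) := by omega
      rwa [e] at this

lemma pvSafe_head (f m : List Char) (cs : List Char) (k : Nat)
    (h : pvSafeFrom f m ('Y' :: cs) k) : k < f.length ∧ k < m.length := by
  have := h 0 (by simp) (by intro j hj; omega) (by simp)
  simpa using this

lemma pvRunA_true (f m : List Char) (cs : List Char) :
    ∀ (k : Nat) (curr : Int), pvSafeFrom f m cs k →
      pvRunA f m cs k true curr = some (pvAllGood f m cs k, curr + pvCountY cs) := by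
  induction cs with
  | nil => intro k curr _; simp [pvRunA, pvAllGood, pvCountY]
  | cons c cs ih =>
    intro k curr hsafe
    by_cases hc : c = 'Y'
    · subst hc
      obtain ⟨hkf, hkm⟩ := pvSafe_head f m cs k hsafe
      have hf : PySem.List.pyGet? f (k : Int) = some (f.getD k ' ') := by
        rw [PySem.List.pyGet?_natCast, List.getElem?_eq_getElem hkf, List.getD_eq_getElem _ _ hkf]
      have hm : PySem.List.pyGet? m (k : Int) = some (m.getD k ' ') := by
        rw [PySem.List.pyGet?_natCast, List.getElem?_eq_getElem hkm, List.getD_eq_getElem _ _ hkm]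
      have hbool : ((f.getD k ' ' == m.getD k ' ') && (m.getD k ' ' == 'Y')) = decide (pvGoodAt f m k) := by
        rw [Bool.eq_iff_iff]
        simp only [Bool.and_eq_true, beq_iff_eq, decide_eq_true_iff]
        constructor
        · rintro ⟨h1, h2⟩; exact ⟨hkf, hkm, h1.trans h2, h2⟩
        · rintro ⟨-, -, h3, h4⟩; exact ⟨h3.trans h4.symm, h4⟩
      by_cases hg : pvGoodAt f m k
      · have hb : ((f.getD k ' ' == m.getD k ' ') && (m.getD k ' ' == 'Y')) = true := by
          rw [hbool]; simpa using hg
        have hsafe' := pvSafe_cons f m 'Y' cs k hsafe (fun _ => hg)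
        have hcnt : pvCountY ('Y' :: cs) = pvCountY cs + 1 := by
          simp [pvCountY]
        simp only [pvRunA, pvAllGood, hf, hm, hb, beq_self_eq_true, if_true]
        rw [ih (k + 1) (curr + 1) hsafe', hcnt, decide_eq_true hg, Bool.true_and,
          show curr + 1 + pvCountY cs = curr + (pvCountY cs + 1) from by ring]
      · have hb : ((f.getD k ' ' == m.getD k ' ') && (m.getD k ' ' == 'Y')) = false := by
          rw [hbool]; simpa using hg
        have hcnt : pvCountY ('Y' :: cs) = pvCountY cs + 1 := by
          simp [pvCountY]
        simp only [pvRunA, pvAllGood, hf, hm, hb, beq_self_eq_true, if_true]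
        rw [pvRunA_false, hcnt, decide_eq_false hg, Bool.false_and,
          show curr + 1 + pvCountY cs = curr + (pvCountY cs + 1) from by ring]
    · have hc' : (c == 'Y') = false := by simpa using hc
      have hcnt : pvCountY (c :: cs) = pvCountY cs := by simp [pvCountY, hc]
      simp only [pvRunA, pvAllGood, hc', Bool.false_eq_true, if_false, hcnt]
      exact ih (k + 1) curr (pvSafe_cons f m c cs k hsafe (fun h => absurd h hc))

lemma pvYFrom_cons (c : Char) (cs : List Char) (k : Nat) :
    pvYFrom (c :: cs) k =
      if c = 'Y' then (k : Int) :: pvYFrom cs (k + 1) else pvYFrom cs (k + 1) := by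
  have hcast : ((k : Int) + 1) = ((k + 1 : Nat) : Int) := by push_cast; ring
  rw [pvYFrom, PySem.List.enumerate_cons, List.filterMap_cons, hcast]
  by_cases hc : c = 'Y' <;> simp [pvYFrom, hc]

lemma pvAllGood_eq (f m : List Char) (cs : List Char) :
    ∀ k : Nat, pvAllGood f m cs k = (pvCompat f (pvYFrom cs k) && pvCompat m (pvYFrom cs k)) := by
  induction cs with
  | nil => intro k; simp [pvAllGood, pvYFrom, PySem.List.enumerate_nil, pvCompat]
  | cons c cs ih =>
    intro k
    rw [pvYFrom_cons]
    by_cases hc : c = 'Y'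
    · simp only [pvAllGood, if_pos hc, if_pos (by simp [hc] : (c == 'Y') = true), ih]
      rw [Bool.eq_iff_iff]
      simp only [pvCompat, List.all_cons, Bool.and_eq_true, decide_eq_true_iff, beq_iff_eq,
        PySem.List.pyGetD_natCast, Nat.cast_lt, pvGoodAt]
      tauto
    · simp [pvAllGood, hc, ih]

lemma pvYFrom_length (cs : List Char) :
    ∀ k : Nat, ((pvYFrom cs k).length : Int) = pvCountY cs := by
  induction cs with
  | nil => intro k; simp [pvYFrom, PySem.List.enumerate_nil, pvCountY]
  | cons c cs ih =>
    intro k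
    rw [pvYFrom_cons]
    by_cases hc : c = 'Y' <;> simp [hc, ih, pvCountY]

-- the inner loop's result under safety, in B's terms
lemma pvInner_eq (f m s : List Char) (hsafe : pvSafeFrom f m s 0) :
    pvInnerA f m s = some (pvCompat f (pvYPos s) && pvCompat m (pvYPos s), pvCountY s) := by
  have h0 : (PySem.List.enumerate s : List (Int × Char)) = PySem.List.enumerate s ((0 : Nat) : Int) := by
    norm_num
  rw [pvInnerA, h0, pvFold_eq_run, pvRunA_true f m s 0 0 hsafe, pvAllGood_eq, pvYPos_eq_from]
  simp

-- A's fold over males, from a live accumulator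
lemma pvFoldM (f : String) (s : List Char) (M : List String)
    (hsafe : ∀ mm ∈ M, pvSafeFrom f.toList mm.toList s 0) :
    ∀ c : Int,
      M.foldl (fun acc mm =>
        match acc with
        | none => none
        | some c =>
          match pvInnerA f.toList mm.toList s with
          | none => none
          | some (ok, curr) => some (if ok then max c (curr + 2) else c)) (some c)
      = some (if pvCompat f.toList (pvYPos s) && M.any (fun mm => pvCompat mm.toList (pvYPos s))
              then max c (pvCountY s + 2) else c) := by
  induction M with
  | nil => intro c; simp
  | cons mm M ih =>
    intro c
    have hmm := hsafe mm (by simp)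
    have ih' := ih (fun x hx => hsafe x (by simp [hx]))
    rw [List.foldl_cons, pvInner_eq f.toList mm.toList s hmm]
    by_cases hcf : pvCompat f.toList (pvYPos s) = true <;>
      by_cases hcm : pvCompat mm.toList (pvYPos s) = true <;>
        simp [hcf, hcm, ih']

-- A's fold over females (each with the inner fold over males), from a live accumulator
lemma pvFoldF (s : List Char) (F M : List String)
    (hsafe : ∀ ff ∈ F, ∀ mm ∈ M, pvSafeFrom ff.toList mm.toList s 0) :
    ∀ c : Int,
      F.foldl (fun acc ff =>
        M.foldl (fun acc mm =>
          match acc with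
          | none => none
          | some c =>
            match pvInnerA ff.toList mm.toList s with
            | none => none
            | some (ok, curr) => some (if ok then max c (curr + 2) else c)) acc) (some c)
      = some (if F.any (fun ff => pvCompat ff.toList (pvYPos s)) &&
                 M.any (fun mm => pvCompat mm.toList (pvYPos s))
              then max c (pvCountY s + 2) else c) := by
  induction F with
  | nil => intro c; simp
  | cons ff F ih =>
    intro c
    have hff := hsafe ff (by simp)
    have ih' := ih (fun x hx => hsafe x (by simp [hx]))
    rw [List.foldl_cons, pvFoldM ff s M hff c]
    by_cases hcf : pvCompat ff.toList (pvYPos s) = true <;>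
      by_cases hM : M.any (fun mm => pvCompat mm.toList (pvYPos s)) = true <;>
        simp [hcf, hM, ih']

lemma pvFoldS (F M : List String) (S : List String)
    (hsafe : ∀ ss ∈ S, ∀ ff ∈ F, ∀ mm ∈ M, pvSafeFrom ff.toList mm.toList ss.toList 0) :
    ∀ c : Int,
      S.foldl (fun acc ss =>
        F.foldl (fun acc ff =>
          M.foldl (fun acc mm =>
            match acc with
            | none => none
            | some c =>
              match pvInnerA ff.toList mm.toList ss.toList with
              | none => none
              | some (ok, curr) => some (if ok then max c (curr + 2) else c)) acc) acc) (some c)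
      = some (S.foldl (fun best ss =>
          let ys := pvYPos ss.toList
          if F.any (fun ff => pvCompat ff.toList ys) && M.any (fun mm => pvCompat mm.toList ys)
          then max best ((ys.length : Int) + 2) else best) c) := by
  induction S with
  | nil => intro c; simp
  | cons ss S ih =>
    intro c
    have hss := hsafe ss (by simp)
    have ih' := ih (fun x hx => hsafe x (by simp [hx]))
    rw [List.foldl_cons, pvFoldF ss.toList F M hss c, List.foldl_cons, ih']
    have hlen : ((pvYPos ss.toList).length : Int) = pvCountY ss.toList := by
      rw [pvYPos_eq_from]; exact pvYFrom_length _ 0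
    congr 1
    simp only [hlen]

-- ===== VERDICT (by name: the statement is the Claim_ definition above) =====
theorem maxFamily_spec : Claim_equal_maxFamily := by
  intro F M S _ hpre
  unfold Spec_maxFamily maxFamily maxFamily_alt
  rw [pvFoldS F M S hpre 0]
  simp
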